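-- pv_equiv track=rewrite | github.com/MauritsLBJ/PWS_Quantum_Gaming | QuantumCatan/src/resources.py | best_trade_ratio_for
-- ===== SOURCE A (Python) =====
-- def best_trade_ratio_for(player_idx, give_resource, sea_tiles, port_vertex_map, settlements_owner):
--     # check specific port
--     need_port = "port_" + give_resource
--     for si, st in enumerate(sea_tiles):
--         if st.get("port") == need_port:
--             verts = port_vertex_map.get(si, [])
--             for v in verts:
--                 owner = settlements_owner.get(v)
--                 if owner and owner[0] == player_idx:
--                     return 2
--     # check any port
--     for si, st in enumerate(sea_tiles):
--         if st.get("port") == "port_any":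
--             verts = port_vertex_map.get(si, [])
--             for v in verts:
--                 owner = settlements_owner.get(v)
--                 if owner and owner[0] == player_idx:
--                     return 3
--     return 4
-- ===== SOURCE B (Python) =====
-- def best_trade_ratio_for(player_idx, give_resource, sea_tiles, port_vertex_map, settlements_owner):
--     # Single min-accumulating pass; ownership tested by comparing the one-element
--     # prefix of the owner record against [player_idx].
--     def reaches(si):
--         return any(
--             settlements_owner.get(v, [])[:1] == [player_idx]
--             for v in port_vertex_map.get(si, [])
--         )
--     need = "port_" + give_resource
--     best = 4
--     for si, st in enumerate(sea_tiles):
--         p = st.get("port")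
--         if (p == need or p == "port_any") and reaches(si):
--             best = min(best, 2 if p == need else 3)
--     return best
-- ===== Notes on version B (the rewrite author's own statement) =====
-- stated objective: alternative
-- what changed: Replaces A's two early-returning nested scans with a single min-accumulating pass over the tiles (best starts at 4, lowered to 2 or 3 per qualifying tile), with the per-vertex ownership test rewritten as a one-element prefix-slice comparison instead of a truthiness-and-head check.
import Mathlib
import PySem

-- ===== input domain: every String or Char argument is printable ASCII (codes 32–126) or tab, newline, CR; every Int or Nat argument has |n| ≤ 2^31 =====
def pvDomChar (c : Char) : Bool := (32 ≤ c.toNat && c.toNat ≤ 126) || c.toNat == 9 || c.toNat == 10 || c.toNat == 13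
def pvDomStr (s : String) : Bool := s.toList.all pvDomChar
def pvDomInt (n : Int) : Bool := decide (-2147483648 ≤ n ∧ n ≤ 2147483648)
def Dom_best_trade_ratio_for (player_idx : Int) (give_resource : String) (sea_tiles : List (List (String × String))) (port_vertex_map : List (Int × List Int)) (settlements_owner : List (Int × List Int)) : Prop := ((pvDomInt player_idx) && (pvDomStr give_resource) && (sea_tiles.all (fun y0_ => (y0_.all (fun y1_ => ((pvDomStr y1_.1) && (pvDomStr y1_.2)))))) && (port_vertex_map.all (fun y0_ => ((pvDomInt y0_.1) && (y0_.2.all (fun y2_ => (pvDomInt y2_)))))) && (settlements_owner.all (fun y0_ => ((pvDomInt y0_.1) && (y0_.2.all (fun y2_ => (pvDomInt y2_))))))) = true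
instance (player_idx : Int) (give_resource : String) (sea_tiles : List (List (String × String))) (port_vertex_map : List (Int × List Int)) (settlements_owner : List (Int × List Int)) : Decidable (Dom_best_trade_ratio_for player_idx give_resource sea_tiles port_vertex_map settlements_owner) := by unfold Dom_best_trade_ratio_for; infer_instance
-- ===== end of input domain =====

-- B replaces A's two early-returning nested scans by a single min-accumulating pass; same return value.

-- ===== PORT A =====
-- A's inner 'for v in verts: … return' loop, as structural recursion with early exit
def pvVertsLoopA (player_idx : Int) (settlements_owner : List (Int × List Int)) : List Int → Bool
  | [] => false
  | v :: rest =>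
    match (PySem.Dict.mk settlements_owner).get? v with
    | some (a :: _) =>
      if a == player_idx then true
      else pvVertsLoopA player_idx settlements_owner rest
    | _ => pvVertsLoopA player_idx settlements_owner rest

-- one of A's two identical 'for si, st in enumerate(sea_tiles): … return' scans
def pvTilesLoopA (player_idx : Int) (target : String) (port_vertex_map settlements_owner : List (Int × List Int)) : List (Int × List (String × String)) → Bool
  | [] => false
  | (si, st) :: rest =>
    if (PySem.Dict.mk st).get? "port" == some target then
      if pvVertsLoopA player_idx settlements_owner ((PySem.Dict.mk port_vertex_map).getD si []) then true
      else pvTilesLoopA player_idx target port_vertex_map settlements_owner rest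
    else pvTilesLoopA player_idx target port_vertex_map settlements_owner rest

def best_trade_ratio_for (player_idx : Int) (give_resource : String) (sea_tiles : List (List (String × String))) (port_vertex_map : List (Int × List Int)) (settlements_owner : List (Int × List Int)) : Int :=
  let need_port := "port_" ++ give_resource
  if pvTilesLoopA player_idx need_port port_vertex_map settlements_owner (PySem.List.enumerate sea_tiles 0) then 2
  else if pvTilesLoopA player_idx "port_any" port_vertex_map settlements_owner (PySem.List.enumerate sea_tiles 0) then 3
  else 4

-- ===== PORT B =====
-- Source B's reaches(si): some vertex of the tile whose owner record's one-element prefix is [player_idx]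
def pvReachesB (player_idx : Int) (port_vertex_map settlements_owner : List (Int × List Int)) (si : Int) : Bool :=
  ((PySem.Dict.mk port_vertex_map).getD si []).any (fun v =>
    PySem.List.slice ((PySem.Dict.mk settlements_owner).getD v []) none (some 1) == [player_idx])

def best_trade_ratio_for_alt (player_idx : Int) (give_resource : String) (sea_tiles : List (List (String × String))) (port_vertex_map : List (Int × List Int)) (settlements_owner : List (Int × List Int)) : Int :=
  let need := "port_" ++ give_resource
  (PySem.List.enumerate sea_tiles 0).foldl
    (fun best p =>
      let q := (PySem.Dict.mk p.2).get? "port"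
      if (q == some need || q == some "port_any") && pvReachesB player_idx port_vertex_map settlements_owner p.1 then
        min best (if q == some need then 2 else 3)
      else best)
    4

-- ===== PRECONDITION & SPEC =====
def Spec_best_trade_ratio_for (player_idx : Int) (give_resource : String) (sea_tiles : List (List (String × String))) (port_vertex_map : List (Int × List Int)) (settlements_owner : List (Int × List Int)) (out : Int) : Prop := out = best_trade_ratio_for_alt player_idx give_resource sea_tiles port_vertex_map settlements_owner
instance (player_idx : Int) (give_resource : String) (sea_tiles : List (List (String × String))) (port_vertex_map : List (Int × List Int)) (settlements_owner : List (Int × List Int)) (out : Int) : Decidable (Spec_best_trade_ratio_for player_idx give_resource sea_tiles port_vertex_map settlements_owner out) := by unfold Spec_best_trade_ratio_for; infer_instance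

-- ===== CLAIM =====
def Claim_equal_best_trade_ratio_for : Prop := ∀ (player_idx : Int) (give_resource : String) (sea_tiles : List (List (String × String))) (port_vertex_map : List (Int × List Int)) (settlements_owner : List (Int × List Int)), Dom_best_trade_ratio_for player_idx give_resource sea_tiles port_vertex_map settlements_owner → Spec_best_trade_ratio_for player_idx give_resource sea_tiles port_vertex_map settlements_owner (best_trade_ratio_for player_idx give_resource sea_tiles port_vertex_map settlements_owner)

-- ===== LEMMAS AND PROOFS =====

-- B's prefix-slice ownership test coincides with A's truthiness-and-head test, per vertex
theorem pvTest_eq (pi : Int) (so : List (Int × List Int)) (v : Int) :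
    (PySem.List.slice ((PySem.Dict.mk so).getD v []) none (some 1) == [pi])
    = (match (PySem.Dict.mk so).get? v with
       | some (a :: _) => a == pi
       | _ => false) := by
  have h1 : PySem.List.slice ((PySem.Dict.mk so).getD v []) none (some 1)
      = ((PySem.Dict.mk so).getD v []).take 1 := by
    simpa using PySem.List.slice_to_natCast ((PySem.Dict.mk so).getD v []) 1
  have h2 : (PySem.Dict.mk so).getD v [] = ((PySem.Dict.mk so).get? v).getD [] := by
    simp [PySem.Dict.getD, PySem.Dict.get?]
  rw [h1, h2]
  cases h : (PySem.Dict.mk so).get? v with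
  | none => simp
  | some l => cases l with
    | nil => simp
    | cons a t => simp

-- A's early-exit vertex loop is an 'any' over B's per-vertex test
theorem pvVertsLoopA_eq_any (pi : Int) (so : List (Int × List Int)) (vs : List Int) :
    pvVertsLoopA pi so vs
    = vs.any (fun v => PySem.List.slice ((PySem.Dict.mk so).getD v []) none (some 1) == [pi]) := by
  induction vs with
  | nil => rfl
  | cons v rest ih =>
    rw [List.any_cons, pvTest_eq]
    show (match (PySem.Dict.mk so).get? v with
    | some (a :: _) =>
      if a == pi then true
      else pvVertsLoopA pi so rest
    | _ => pvVertsLoopA pi so rest) = _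
    cases h : (PySem.Dict.mk so).get? v with
    | none => simp [ih]
    | some l => cases l with
      | nil => simp [ih]
      | cons a t =>
        by_cases ha : a == pi
        · simp [ha]
        · simp [ha, ih]

-- A's early-exit tile scan is an 'any' over (port matches target ∧ B's reaches)
theorem pvTilesLoopA_eq_any (pi : Int) (target : String) (pvm so : List (Int × List Int)) (ts : List (Int × List (String × String))) :
    pvTilesLoopA pi target pvm so ts
    = ts.any (fun p => ((PySem.Dict.mk p.2).get? "port" == some target) && pvReachesB pi pvm so p.1) := by
  induction ts with
  | nil => rfl
  | cons t rest ih =>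
    obtain ⟨si, st⟩ := t
    rw [List.any_cons]
    show (if (PySem.Dict.mk st).get? "port" == some target then
      if pvVertsLoopA pi so ((PySem.Dict.mk pvm).getD si []) then true
      else pvTilesLoopA pi target pvm so rest
    else pvTilesLoopA pi target pvm so rest) = _
    rw [pvVertsLoopA_eq_any]
    by_cases hp : (PySem.Dict.mk st).get? "port" == some target
    · by_cases hr : ((PySem.Dict.mk pvm).getD si []).any (fun v => PySem.List.slice ((PySem.Dict.mk so).getD v []) none (some 1) == [pi])
      · simp [hp, hr, pvReachesB]
      · simp only [Bool.not_eq_true] at hr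
        simp [hp, hr, ih, pvReachesB]
    · simp only [Bool.not_eq_true] at hp
      simp [hp, ih]

-- B's min-fold, characterised by the two existence tests over the remaining tiles
theorem pvFoldB_char (pi : Int) (need : String) (pvm so : List (Int × List Int)) (ts : List (Int × List (String × String))) (b : Int) (hb : 2 ≤ b) :
    ts.foldl
      (fun best p =>
        let q := (PySem.Dict.mk p.2).get? "port"
        if (q == some need || q == some "port_any") && pvReachesB pi pvm so p.1 then
          min best (if q == some need then 2 else 3)
        else best) b
    = (if ts.any (fun p => ((PySem.Dict.mk p.2).get? "port" == some need) && pvReachesB pi pvm so p.1) then min b 2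
       else if ts.any (fun p => ((PySem.Dict.mk p.2).get? "port" == some "port_any") && pvReachesB pi pvm so p.1) then min b 3
       else b) := by
  induction ts generalizing b with
  | nil => simp
  | cons t rest ih =>
    obtain ⟨si, st⟩ := t
    rw [List.foldl_cons, List.any_cons, List.any_cons]
    show List.foldl _
      (if ((PySem.Dict.mk st).get? "port" == some need || (PySem.Dict.mk st).get? "port" == some "port_any")
          && pvReachesB pi pvm so si then
        min b (if (PySem.Dict.mk st).get? "port" == some need then 2 else 3)
      else b) rest = _
    by_cases hr : pvReachesB pi pvm so si
    · by_cases hn : (PySem.Dict.mk st).get? "port" == some need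
      · rw [if_pos (by simp [hn, hr]), if_pos hn, ih (min b 2) (by omega)]
        simp only [hn, hr, Bool.and_self, Bool.true_or, if_true]
        split_ifs <;> omega
      · by_cases hayn : (PySem.Dict.mk st).get? "port" == some "port_any"
        · rw [if_pos (by simp [hayn, hr]), if_neg hn, ih (min b 3) (by omega)]
          simp only [hn, hr, hayn, Bool.false_and, Bool.and_self, Bool.false_or,
            Bool.true_or, if_true]
          split_ifs <;> omega
        · rw [if_neg (by simp [hn, hayn]), ih b hb]
          simp only [hn, hayn, hr, Bool.false_and, Bool.false_or]
    · simp only [Bool.not_eq_true] at hr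
      rw [if_neg (by simp [hr]), ih b hb]
      simp only [hr, Bool.and_false, Bool.false_or]

-- ===== VERDICT =====
theorem best_trade_ratio_for_spec : Claim_equal_best_trade_ratio_for := by
  intro player_idx give_resource sea_tiles port_vertex_map settlements_owner _
  unfold Spec_best_trade_ratio_for
  simp only [best_trade_ratio_for, best_trade_ratio_for_alt]
  rw [pvFoldB_char player_idx ("port_" ++ give_resource) port_vertex_map settlements_owner
      (PySem.List.enumerate sea_tiles 0) 4 (by norm_num),
    pvTilesLoopA_eq_any, pvTilesLoopA_eq_any]
  split_ifs <;> norm_num
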